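-- pv_equiv track=rewrite | github.com/achilleaspro/CipherMaster-PyToolkit | cipherMaster.py | separate
-- ===== SOURCE A (Python) =====
-- def separate(ciphertext, key_size):
--     list_key = []
--     l = len(ciphertext)
--     list_key_str = []
--     for j in range(key_size):
--         key_str = ""
--         key = []
--         for i in range(0, l, key_size):
--             if (i + j < l):
--                 key_str += ciphertext[j + i]
--                 key.append(ciphertext[j + i])
--         list_key.append(key)
--         list_key_str.append(key_str)
--
--     return list_key, list_key_str
-- ===== SOURCE B (Python) =====
-- def separate(ciphertext, key_size):
--     # One-pass scatter: distribute characters into buckets by index mod key_size.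
--     buckets = [[] for _ in range(key_size)]
--     if key_size > 0:
--         for idx, ch in enumerate(ciphertext):
--             buckets[idx % key_size].append(ch)
--     list_key_str = ["".join(b) for b in buckets]
--     return buckets, list_key_str
-- ===== Notes on version B (the rewrite author's own statement) =====
-- stated objective: faster
-- what changed: Replaces A's nested column-by-column gather (for each j, scan indices j, j+k, ... with a bounds guard) by a single pass over the ciphertext that scatters each character into bucket idx % key_size, then joins the buckets.
import Mathlib
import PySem

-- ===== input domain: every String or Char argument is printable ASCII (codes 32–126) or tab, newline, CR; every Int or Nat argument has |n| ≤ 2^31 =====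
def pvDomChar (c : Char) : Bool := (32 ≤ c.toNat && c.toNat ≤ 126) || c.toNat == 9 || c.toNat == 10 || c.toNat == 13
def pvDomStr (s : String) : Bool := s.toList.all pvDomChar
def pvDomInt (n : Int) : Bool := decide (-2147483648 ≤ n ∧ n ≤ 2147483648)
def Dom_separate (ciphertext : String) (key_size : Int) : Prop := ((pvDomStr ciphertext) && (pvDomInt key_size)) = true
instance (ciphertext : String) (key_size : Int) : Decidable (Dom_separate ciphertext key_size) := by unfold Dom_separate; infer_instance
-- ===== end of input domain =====

-- B replaces A's nested column-by-column gather with a single scatter pass over the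
-- ciphertext (bucket idx % key_size), then joins the buckets; same return value.

-- ===== PORT A =====
-- Python strings are built char by char; we carry the growing key_str as its char list
-- (p.1) and convert with String.ofList at the end (exact: += on str appends one char here).
-- separateInner is A's inner 'for i in range(0, l, key_size)' loop, for one value of j.
def separateInner (cs : List Char) (l key_size j : Int) : List Char × List String :=
  (PySem.List.pyRange 0 l key_size).foldl
    (fun (p : List Char × List String) i =>
      if i + j < l then
        match PySem.List.pyGet? cs (j + i) with
        | some c => (p.1 ++ [c], p.2 ++ [String.singleton c])
        | none => p   -- unreachable: the guard i + j < l keeps the index in range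
      else p)
    ([], [])

def separate (ciphertext : String) (key_size : Int) : List (List String) × List String :=
  let cs := ciphertext.toList
  let l : Int := PySem.Str.len ciphertext
  (PySem.List.pyRange 0 key_size 1).foldl
    (fun (acc : List (List String) × List String) j =>
      let inner := separateInner cs l key_size j
      (acc.1 ++ [inner.2], acc.2 ++ [String.ofList inner.1]))
    ([], [])

-- ===== PORT B =====
def separate_alt (ciphertext : String) (key_size : Int) : List (List String) × List String :=
  let buckets0 : List (List String) :=
    (PySem.List.pyRange 0 key_size 1).map (fun _ => ([] : List String))
  let buckets : List (List String) :=
    if 0 < key_size then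
      (PySem.List.enumerate ciphertext.toList 0).foldl
        (fun bs ic =>
          bs.modify (PySem.Int.mod ic.1 key_size).toNat (fun b => b ++ [String.singleton ic.2]))
        buckets0
    else buckets0
  (buckets, buckets.map (fun b => PySem.Str.join "" b))

-- ===== PRECONDITION & SPEC =====
def Spec_separate (ciphertext : String) (key_size : Int) (out : List (List String) × List String) : Prop := out = separate_alt ciphertext key_size
instance (ciphertext : String) (key_size : Int) (out : List (List String) × List String) : Decidable (Spec_separate ciphertext key_size out) := by unfold Spec_separate; infer_instance

-- ===== CLAIM (what is proved, stated in full; the proofs are below) =====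
def Claim_equal_separate : Prop := ∀ (ciphertext : String) (key_size : Int), Dom_separate ciphertext key_size → Spec_separate ciphertext key_size (separate ciphertext key_size)

-- ===== LEMMAS AND PROOFS =====

-- the j-th column of cs under step k, read off left to right (index counter n)
def pvScan (k j : Nat) : Nat → List Char → List Char
  | _, [] => []
  | n, c :: cs => (if n % k = j then [c] else []) ++ pvScan k j (n + 1) cs

theorem pvScan_append (k j : Nat) (xs ys : List Char) : ∀ n,
    pvScan k j n (xs ++ ys) = pvScan k j n xs ++ pvScan k j (n + xs.length) ys := by
  induction xs with
  | nil => simp [pvScan]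
  | cons c xs ih =>
    intro n
    simp [pvScan, ih (n + 1), List.append_assoc]
    ring_nf

theorem pvScan_shift (k j : Nat) (cs : List Char) : ∀ n,
    pvScan k j (n + k) cs = pvScan k j n cs := by
  induction cs with
  | nil => simp [pvScan]
  | cons c cs ih =>
    intro n
    simp [pvScan, Nat.add_mod_right, add_right_comm n k 1, ih (n + 1)]

theorem pvScan_small (k j : Nat) (hj : j < k) : ∀ (cs : List Char) (n : Nat),
    n + cs.length ≤ k → pvScan k j n cs = if n ≤ j then (cs[j - n]?).toList else [] := by
  intro cs
  induction cs with
  | nil => intro n _; simp [pvScan]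
  | cons c cs ih =>
    intro n hn
    simp only [List.length_cons] at hn
    have hnk : n < k := by omega
    have hmod : n % k = n := Nat.mod_eq_of_lt hnk
    by_cases h : n = j
    · subst h
      have : ¬ (n + 1 ≤ n) := by omega
      simp [pvScan, hmod, ih (n + 1) (by omega), this]
    · by_cases h2 : n ≤ j
      · have hlt : n < j := by omega
        have : (c :: cs)[j - n]? = cs[j - (n + 1)]? := by
          have : j - n = (j - (n + 1)) + 1 := by omega
          simp [this]
        simp [pvScan, hmod, h, ih (n + 1) (by omega), h2, hlt, this]
      · simp [pvScan, hmod, h, ih (n + 1) (by omega), h2, show ¬ (n + 1 ≤ j) by omega]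

theorem pvScan_block (k j : Nat) (_hk : 0 < k) (hj : j < k) (cs : List Char) :
    pvScan k j 0 cs = (cs[j]?).toList ++ pvScan k j 0 (cs.drop k) := by
  by_cases hlen : cs.length ≤ k
  · have hd : cs.drop k = [] := List.drop_eq_nil_iff.mpr hlen
    have := pvScan_small k j hj cs 0 (by omega)
    simp [hd, pvScan, this]
  · conv_lhs => rw [← List.take_append_drop k cs]
    rw [pvScan_append]
    have hkt : (List.take k cs).length = k := by
      simp [List.length_take]; omega
    rw [hkt]
    have h1 : pvScan k j 0 (List.take k cs) = ((List.take k cs)[j]?).toList :=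
      by simpa using pvScan_small k j hj (List.take k cs) 0 (by omega)
    have h2 : (List.take k cs)[j]? = cs[j]? := by
      simp [hj]
    rw [h1, h2, show (0 + k) = k from by omega]
    have := pvScan_shift k j (cs.drop k) 0
    simp at this
    rw [this]

-- generic fold shapes
theorem pvFoldPush (f : Int → Option Char) (rs : List Int) : ∀ (a : List Char) (b : List String),
    rs.foldl (fun (p : List Char × List String) i =>
        match f i with
        | some c => (p.1 ++ [c], p.2 ++ [String.singleton c])
        | none => p) (a, b)
    = (a ++ rs.filterMap f, b ++ (rs.filterMap f).map (fun c => String.singleton c)) := by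
  induction rs with
  | nil => simp
  | cons r rs ih =>
    intro a b
    cases h : f r with
    | none => simp [List.foldl_cons, h, ih]
    | some c => simp [List.foldl_cons, h, ih, List.append_assoc]

theorem pvFoldPairMap {α : Type} (F : α → List String) (G : α → String) (rs : List α) :
    ∀ (a : List (List String)) (b : List String),
    rs.foldl (fun (acc : List (List String) × List String) j => (acc.1 ++ [F j], acc.2 ++ [G j])) (a, b)
    = (a ++ rs.map F, b ++ rs.map G) := by
  induction rs with
  | nil => simp
  | cons r rs ih => intro a b; simp [List.foldl_cons, ih, List.append_assoc]

theorem pvFilterMap_cons_toList {α β : Type} (f : α → Option β) (a : α) (l : List α) :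
    List.filterMap f (a :: l) = (f a).toList ++ List.filterMap f l := by
  cases h : f a <;> simp [h]

theorem pvQ_succ (k l : Nat) (hk : 0 < k) (hl : 0 < l) :
    (l + k - 1) / k = ((l - k) + k - 1) / k + 1 := by
  by_cases h : k ≤ l
  · have h1 : l - k + k - 1 = l - 1 := by omega
    have h2 : l + k - 1 = (l - 1) + k := by omega
    rw [h1, h2, Nat.add_div_right _ hk]
  · have h : l < k := by omega
    have h1 : l - k = 0 := by omega
    have h2 : (k - 1) / k = 0 := Nat.div_eq_of_lt (by omega)
    have h3 : (l + k - 1) / k = 1 := by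
      refine Nat.div_eq_of_lt_le (by omega) (by omega)
    simp [h1, h2, h3]

-- A's column j equals pvScan
theorem pvCol_eq (k j : Nat) (hk : 0 < k) (hj : j < k) : ∀ (cs : List Char),
    (List.range (if (0:Int) < (cs.length : Int) then (((cs.length : Int) + (k:Int) - 1) / (k:Int)).toNat else 0)).filterMap
      (fun m => cs[j + k * m]?) = pvScan k j 0 cs := by
  suffices H : ∀ (n : Nat) (cs : List Char), cs.length ≤ n →
      (List.range (if (0:Int) < (cs.length : Int) then (((cs.length : Int) + (k:Int) - 1) / (k:Int)).toNat else 0)).filterMap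
        (fun m => cs[j + k * m]?) = pvScan k j 0 cs by
    intro cs; exact H cs.length cs le_rfl
  intro n
  induction n with
  | zero =>
    intro cs hle
    have : cs = [] := List.eq_nil_of_length_eq_zero (by omega)
    subst this; simp [pvScan]
  | succ n ih =>
    intro cs hle
    cases hcs : cs with
    | nil => simp [pvScan]
    | cons c cs' =>
      subst hcs
      set l := (c :: cs').length with hl
      have hl0 : 0 < l := by simp [hl]
      have hQcast : (if (0:Int) < (l : Int) then (((l : Int) + (k:Int) - 1) / (k:Int)).toNat else 0)
          = (l + k - 1) / k := by
        have h1 : (l:Int) + k - 1 = ((l + k - 1 : Nat) : Int) := by omega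
        rw [if_pos (by exact_mod_cast hl0), h1]
        rfl
      have hQdrop : (if (0:Int) < (((c :: cs').drop k).length : Int) then
            (((((c :: cs').drop k).length : Int) + (k:Int) - 1) / (k:Int)).toNat else 0)
          = ((l - k) + k - 1) / k := by
        have hdl : ((c :: cs').drop k).length = l - k := by simp [hl]
        rcases Nat.eq_zero_or_pos (l - k) with h0 | hpos
        · rw [hdl, h0, if_neg (by simp)]
          have : (k - 1) / k = 0 := Nat.div_eq_of_lt (by omega)
          simp [this]
        · rw [hdl]
          have h1 : (((l - k : Nat)):Int) + (k:Int) - 1 = (((l - k) + k - 1 : Nat) : Int) := by omega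
          rw [if_pos (by exact_mod_cast hpos), h1]
          rfl
      rw [hQcast, pvQ_succ k l hk hl0, List.range_succ_eq_map,
        pvFilterMap_cons_toList, List.filterMap_map]
      have hfun : ((fun m => (c :: cs')[j + k * m]?) ∘ Nat.succ)
          = (fun m => ((c :: cs').drop k)[j + k * m]?) := by
        funext m
        simp only [Function.comp_apply, List.getElem?_drop]
        congr 1
        simp [Nat.mul_succ]
        omega
      have hih := ih ((c :: cs').drop k) (by simp [hl] at hle ⊢; omega)
      rw [hQdrop] at hih
      rw [hfun, hih, pvScan_block k j hk hj (c :: cs')]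
      simp

-- B's fold invariant
theorem pvBFold (ks : Int) (hks : 0 < ks) : ∀ (cs : List Char) (n : Nat) (bs : List (List String)),
    (((PySem.List.enumerate cs (n : Int)).foldl
        (fun bs ic =>
          bs.modify (PySem.Int.mod ic.1 ks).toNat (fun b => b ++ [String.singleton ic.2])) bs).length
      = bs.length)
    ∧ ∀ j : Nat,
      ((PySem.List.enumerate cs (n : Int)).foldl
        (fun bs ic =>
          bs.modify (PySem.Int.mod ic.1 ks).toNat (fun b => b ++ [String.singleton ic.2])) bs)[j]?
      = (bs[j]?).map (fun b => b ++ (pvScan ks.toNat j n cs).map (fun c => String.singleton c)) := by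
  intro cs
  induction cs with
  | nil =>
    intro n bs
    constructor
    · simp [PySem.List.enumerate]
    · intro j; simp [PySem.List.enumerate, pvScan]
  | cons c cs ih =>
    intro n bs
    have hmod : (PySem.Int.mod (n : Int) ks).toNat = n % ks.toNat := by
      have hk : (0:Int) ≤ ks := le_of_lt hks
      have h2 : (ks.toNat : Int) = ks := Int.toNat_of_nonneg hk
      rw [show PySem.Int.mod (n:Int) ks = Int.fmod (n:Int) ks from rfl,
          Int.fmod_eq_emod_of_nonneg _ hk]
      conv_lhs => rw [← h2, ← Int.natCast_mod]
      rw [Int.toNat_natCast]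
    have hcast : ((n : Int) + 1) = ((n + 1 : Nat) : Int) := by push_cast; ring
    rw [PySem.List.enumerate_cons, List.foldl_cons, hcast]
    obtain ⟨ihlen, ihget⟩ := ih (n + 1)
      (bs.modify (PySem.Int.mod (n : Int) ks).toNat (fun b => b ++ [String.singleton c]))
    constructor
    · rw [ihlen]; simp
    · intro j
      rw [ihget j, hmod, List.getElem?_modify]
      by_cases hj : n % ks.toNat = j
      · simp [hj, pvScan, Option.map_map, Function.comp_def]
      · simp [hj, pvScan]

theorem pvJoin_singletons (col : List Char) :
    PySem.Str.join "" (col.map (fun c => String.singleton c)) = String.ofList col := by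
  apply String.toList_inj.mp
  simp [PySem.Str.toList_join, List.map_map, Function.comp_def,
    PySem.Chars.join_nil_singletons]

-- A's inner loop (one j) produces exactly column j (pvScan) and its singleton-string list
theorem pvInner_eq (cs : List Char) (ks j : Int) (hks : 0 < ks) (hj0 : 0 ≤ j) (hjk : j < ks) :
    separateInner cs (cs.length : Int) ks j
      = (pvScan ks.toNat j.toNat 0 cs,
         (pvScan ks.toNat j.toNat 0 cs).map (fun c => String.singleton c)) := by
  have hksk : (ks.toNat : Int) = ks := Int.toNat_of_nonneg (le_of_lt hks)
  have hk0 : 0 < ks.toNat := by omega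
  have hjtk : j.toNat < ks.toNat := by omega
  unfold separateInner
  have hbody : (fun (p : List Char × List String) i =>
      if i + j < (cs.length:Int) then
        match PySem.List.pyGet? cs (j + i) with
        | some c => (p.1 ++ [c], p.2 ++ [String.singleton c])
        | none => p
      else p)
      = (fun (p : List Char × List String) i =>
        match (if i + j < (cs.length:Int) then PySem.List.pyGet? cs (j + i) else none) with
        | some c => (p.1 ++ [c], p.2 ++ [String.singleton c])
        | none => p) := by
    funext p i; by_cases h : i + j < (cs.length:Int) <;> simp [h]
  rw [hbody,
    pvFoldPush (fun i => if i + j < (cs.length:Int) then PySem.List.pyGet? cs (j + i) else none)]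
  have hfm : List.filterMap
      (fun i => if i + j < (cs.length:Int) then PySem.List.pyGet? cs (j + i) else none)
      (PySem.List.pyRange 0 (cs.length:Int) ks)
      = pvScan ks.toNat j.toNat 0 cs := by
    rw [List.filterMap_congr (g := fun i => PySem.List.pyGet? cs (j + i)) ?hcg]
    case hcg =>
      intro i hi
      rw [PySem.List.mem_pyRange_iff_of_pos hks] at hi
      by_cases h : i + j < (cs.length:Int)
      · simp [h]
      · have h0 : 0 ≤ j + i := by omega
        have hji : j + i = ((j + i).toNat : Int) := (Int.toNat_of_nonneg h0).symm
        rw [if_neg h]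
        show none = PySem.List.pyGet? cs (j + i)
        rw [hji, PySem.List.pyGet?_natCast]
        exact (List.getElem?_eq_none (by omega)).symm
    rw [PySem.List.pyRange_of_pos 0 (cs.length:Int) hks, List.filterMap_map]
    have hfun2 : ((fun i => PySem.List.pyGet? cs (j + i)) ∘ (fun m : Nat => (0:Int) + ks * (m:Int)))
        = fun m : Nat => cs[j.toNat + ks.toNat * m]? := by
      funext m
      have he : j + ((0:Int) + ks * (m:Int)) = ((j.toNat + ks.toNat * m : Nat) : Int) := by
        push_cast
        rw [hksk, Int.toNat_of_nonneg hj0]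
        ring
      simp only [Function.comp_apply]
      rw [he, PySem.List.pyGet?_natCast]
    rw [hfun2]
    have hQ : (if (0:Int) < (cs.length:Int) then
          (((cs.length:Int) - 0 + ks - 1) / ks).toNat else 0)
        = (if (0:Int) < (cs.length:Int) then
          (((cs.length:Int) + (ks.toNat:Int) - 1) / (ks.toNat:Int)).toNat else 0) := by
      rw [hksk, sub_zero]
    rw [hQ]
    exact pvCol_eq ks.toNat j.toNat hk0 hjtk cs
  simp [hfm]

-- ===== VERDICT (by name: the statement is the Claim_ definition above) =====
theorem separate_spec : Claim_equal_separate := by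
  intro ct ks _
  unfold Spec_separate
  by_cases hks : 0 < ks
  · have hksk : (ks.toNat : Int) = ks := Int.toNat_of_nonneg (le_of_lt hks)
    have hlen : PySem.Str.len ct = (ct.toList.length : Int) := by
      simp [PySem.Str.len_eq]
    obtain ⟨hBlen, hBget⟩ := pvBFold ks hks ct.toList 0
      ((PySem.List.pyRange 0 ks 1).map (fun _ => ([] : List String)))
    simp only [separate, separate_alt, hlen, if_pos hks]
    rw [pvFoldPairMap (fun j => (separateInner ct.toList (ct.toList.length:Int) ks j).2)
      (fun j => String.ofList (separateInner ct.toList (ct.toList.length:Int) ks j).1)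
      (PySem.List.pyRange 0 ks 1) [] []]
    simp only [List.nil_append]
    have hcast0 : ((0:Nat):Int) = (0:Int) := by norm_num
    rw [hcast0] at hBget
    refine Prod.ext ?_ ?_
    · apply List.ext_getElem?
      intro i
      rw [hBget i]
      simp only [List.getElem?_map, PySem.List.getElem?_pyRange_one, sub_zero]
      by_cases hi : i < ks.toNat
      · rw [if_pos hi]
        simp only [Option.map_some]
        rw [pvInner_eq ct.toList ks ((0:Int) + (i:Int)) hks (by omega) (by omega)]
        simp
      · rw [if_neg hi]; simp
    · apply List.ext_getElem?
      intro i
      simp only [List.getElem?_map]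
      rw [hBget i]
      simp only [List.getElem?_map, PySem.List.getElem?_pyRange_one, sub_zero]
      by_cases hi : i < ks.toNat
      · rw [if_pos hi]
        simp only [Option.map_some]
        rw [pvInner_eq ct.toList ks ((0:Int) + (i:Int)) hks (by omega) (by omega)]
        simp [pvJoin_singletons]
      · rw [if_neg hi]; simp
  · have h0 : PySem.List.pyRange 0 ks 1 = [] := PySem.List.pyRange_one_eq_nil (by omega)
    simp [separate, separate_alt, h0, hks]
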